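-- pv_equiv track=rewrite | github.com/Sneh-Patel-H4H/AI-Dashboard-1 | api/index.py | _detect_time_column
-- ===== SOURCE A (Python) =====
-- def _detect_time_column(column_meta: dict) -> str | None:
--     """Find the time/date column."""
--     for col, meta in column_meta.items():
--         if meta.get("type") == "date":
--             return col
--     # Check column names for date-like names
--     date_names = ["date", "time", "timestamp", "created", "updated", "month", "year", "day", "period", "week"]
--     for col in column_meta:
--         if any(dn in col.lower() for dn in date_names):
--             return col
--     return None
-- ===== SOURCE B (Python) =====
-- def _detect_time_column(column_meta: dict) -> str | None:
--     """Find the time/date column in one pass, keeping a name-match fallback."""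
--     date_names = ["date", "time", "timestamp", "created", "updated", "month", "year", "day", "period", "week"]
--     fallback = None
--     for col, meta in column_meta.items():
--         if meta.get("type") == "date":
--             return col
--         if fallback is None and any(dn in col.lower() for dn in date_names):
--             fallback = col
--     return fallback
-- ===== Notes on version B (the rewrite author's own statement) =====
-- stated objective: alternative
-- what changed: A's two priority-ordered scans over column_meta are fused into one pass that returns immediately on a date-typed column while accumulating the first name-matching column as a fallback returned after the loop.
import Mathlib
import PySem

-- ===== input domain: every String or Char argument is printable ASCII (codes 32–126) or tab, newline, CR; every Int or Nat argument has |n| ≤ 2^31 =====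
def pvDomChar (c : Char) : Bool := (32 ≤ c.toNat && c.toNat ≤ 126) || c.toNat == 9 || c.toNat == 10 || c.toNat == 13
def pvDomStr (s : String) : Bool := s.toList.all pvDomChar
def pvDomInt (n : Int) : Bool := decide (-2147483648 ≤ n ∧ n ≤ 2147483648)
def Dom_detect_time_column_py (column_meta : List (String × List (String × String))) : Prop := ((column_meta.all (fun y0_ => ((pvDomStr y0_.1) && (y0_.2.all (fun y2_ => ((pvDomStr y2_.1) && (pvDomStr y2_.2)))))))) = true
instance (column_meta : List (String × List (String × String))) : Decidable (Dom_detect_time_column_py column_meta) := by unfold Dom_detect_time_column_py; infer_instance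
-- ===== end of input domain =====

-- B fuses A's two priority-ordered scans into one pass with an accumulated name-match fallback; same result.

-- shared helpers (ported Python primitives used by both sides)
-- mta.get("type") on the association list: first match, none if absent
def pvMetaType (mta : List (String × String)) : Option String :=
  (mta.find? (fun q => q.1 == "type")).map (·.2)

def pvDateNames : List String :=
  ["date", "time", "timestamp", "created", "updated", "month", "year", "day", "period", "week"]

-- any(dn in col.lower() for dn in date_names)
def pvNameMatch (col : String) : Bool :=
  pvDateNames.any (fun dn => PySem.Str.isIn dn (PySem.Str.lower col))

-- ===== PORT A =====
-- first loop: return col whose mta.get("type") == "date"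
def detectA_loop1 : List (String × List (String × String)) → Option String
  | [] => none
  | (col, mta) :: rest =>
      if pvMetaType mta == some "date" then some col else detectA_loop1 rest

-- second loop: return col whose lowered name contains a date-like name
def detectA_loop2 : List (String × List (String × String)) → Option String
  | [] => none
  | (col, _) :: rest =>
      if pvNameMatch col then some col else detectA_loop2 rest

def detect_time_column_py (column_meta : List (String × List (String × String))) : Option String :=
  match detectA_loop1 column_meta with
  | some col => some col
  | none =>
      match detectA_loop2 column_meta with
      | some col => some col
      | none => none

-- ===== PORT B =====
-- single pass with the fallback accumulator from Source B
def detectB_go : List (String × List (String × String)) → Option String → Option String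
  | [], fallback => fallback
  | (col, mta) :: rest, fallback =>
      if pvMetaType mta == some "date" then some col
      else detectB_go rest (if fallback.isNone && pvNameMatch col then some col else fallback)

def detect_time_column_py_alt (column_meta : List (String × List (String × String))) : Option String :=
  detectB_go column_meta none

-- ===== PRECONDITION & SPEC =====
def Spec_detect_time_column_py (column_meta : List (String × List (String × String))) (out : Option String) : Prop := out = detect_time_column_py_alt column_meta
instance (column_meta : List (String × List (String × String))) (out : Option String) : Decidable (Spec_detect_time_column_py column_meta out) := by unfold Spec_detect_time_column_py; infer_instance

-- ===== CLAIM (what is proved, stated in full; the proofs are below) =====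
def Claim_equal_detect_time_column_py : Prop := ∀ (column_meta : List (String × List (String × String))), Dom_detect_time_column_py column_meta → Spec_detect_time_column_py column_meta (detect_time_column_py column_meta)

-- ===== LEMMAS AND PROOFS =====

-- B's single pass equals: date-scan first, then the fallback, then the name-scan.
theorem detectB_go_eq (l : List (String × List (String × String))) (fb : Option String) :
    detectB_go l fb =
      match detectA_loop1 l with
      | some c => some c
      | none => match fb with
                | some f => some f
                | none => detectA_loop2 l := by
  induction l generalizing fb with
  | nil => cases fb <;> simp [detectB_go, detectA_loop1, detectA_loop2]
  | cons p rest ih =>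
      obtain ⟨col, mta⟩ := p
      by_cases h : pvMetaType mta == some "date"
      · simp [detectB_go, detectA_loop1, h]
      · cases fb with
        | some f =>
            simp [detectB_go, detectA_loop1, h, ih]
        | none =>
            by_cases hn : pvNameMatch col
            · simp [detectB_go, detectA_loop1, detectA_loop2, h, hn, ih]
            · simp [detectB_go, detectA_loop1, detectA_loop2, h, hn, ih]

-- ===== VERDICT (by name: the statement is the Claim_ definition above) =====
theorem detect_time_column_py_spec : Claim_equal_detect_time_column_py := by
  intro cm _
  unfold Spec_detect_time_column_py detect_time_column_py detect_time_column_py_alt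
  rw [detectB_go_eq]
  cases detectA_loop1 cm <;> cases h2 : detectA_loop2 cm <;> simp
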